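-- pv_equiv track=rewrite | github.com/sudoursa/challenges | sololearn/challenges/anadrome.py | find_if_one_odd
-- ===== SOURCE A (Python) =====
-- def find_if_one_odd(letter_dict):
--     one_odd = None
--     for _ in letter_dict:
--         if letter_dict[_] % 2 == 0:
--             continue
--         if letter_dict[_] % 2 == 1:
--             if one_odd is None:
--                 one_odd = True
--             else:
--                 one_odd = False
--                 break
--     return one_odd
-- ===== SOURCE B (Python) =====
-- def find_if_one_odd(letter_dict):
--     odds = sum(1 for v in letter_dict.values() if v % 2 == 1)
--     return None if odds == 0 else odds == 1
-- ===== Notes on version B (the rewrite author's own statement) =====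
-- stated objective: simpler
-- what changed: Replaces the None/True/False state flag with early break by a single odd-value count followed by a count-to-tri-state mapping (None if 0, else odds == 1).
import Mathlib
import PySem

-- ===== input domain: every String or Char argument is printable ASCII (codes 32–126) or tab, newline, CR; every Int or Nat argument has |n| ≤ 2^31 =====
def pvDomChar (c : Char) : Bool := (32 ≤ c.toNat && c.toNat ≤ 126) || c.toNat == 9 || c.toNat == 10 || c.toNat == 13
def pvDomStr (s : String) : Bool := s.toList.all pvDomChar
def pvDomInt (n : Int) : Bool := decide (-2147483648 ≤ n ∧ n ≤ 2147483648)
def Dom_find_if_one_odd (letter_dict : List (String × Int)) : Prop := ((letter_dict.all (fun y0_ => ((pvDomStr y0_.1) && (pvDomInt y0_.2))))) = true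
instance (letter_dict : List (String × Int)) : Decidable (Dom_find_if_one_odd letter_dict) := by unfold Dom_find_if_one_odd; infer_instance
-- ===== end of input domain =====

-- B replaces A's None/True/False state flag with early break by one odd-value count mapped to the tri-state result (simpler decomposition).


-- ===== PORT A =====
-- 'for _ in letter_dict' iterates the dict's keys and 'letter_dict[_]' fetches that key's
-- value; since dict keys are unique this is exactly each entry's own value, so the loop is
-- ported over the (key, value) entries, keeping the state flag and the break.
def pvALoop (rest : List (String × Int)) (one_odd : Option Bool) : Option Bool :=
  match rest with
  | [] => one_odd
  | (_, v) :: t =>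
    if PySem.Int.mod v 2 = 0 then pvALoop t one_odd          -- continue
    else if PySem.Int.mod v 2 = 1 then
      match one_odd with
      | none => pvALoop t (some true)
      | some _ => some false                                  -- one_odd = False; break
    else pvALoop t one_odd                                    -- neither test fired

def find_if_one_odd (letter_dict : List (String × Int)) : Option Bool :=
  pvALoop letter_dict none

-- ===== PORT B =====
def find_if_one_odd_alt (letter_dict : List (String × Int)) : Option Bool :=
  let odds := ((letter_dict.map Prod.snd).filter (fun v => PySem.Int.mod v 2 == 1)).length
  if odds = 0 then none else some (odds == 1)

-- ===== PRECONDITION & SPEC =====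
def Spec_find_if_one_odd (letter_dict : List (String × Int)) (out : Option Bool) : Prop := out = find_if_one_odd_alt letter_dict
instance (letter_dict : List (String × Int)) (out : Option Bool) : Decidable (Spec_find_if_one_odd letter_dict out) := by unfold Spec_find_if_one_odd; infer_instance

-- ===== CLAIM (what is proved, stated in full; the proofs are below) =====
def Claim_equal_find_if_one_odd : Prop := ∀ (letter_dict : List (String × Int)), Dom_find_if_one_odd letter_dict → Spec_find_if_one_odd letter_dict (find_if_one_odd letter_dict)

-- ===== LEMMAS AND PROOFS =====
def pvOdds (l : List (String × Int)) : Nat :=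
  ((l.map Prod.snd).filter (fun v => PySem.Int.mod v 2 == 1)).length

theorem pvOdds_cons_even (k : String) (v : Int) (t : List (String × Int))
    (h : PySem.Int.mod v 2 = 0) : pvOdds ((k, v) :: t) = pvOdds t := by
  have hc : (PySem.Int.mod v 2 == 1) = false := by rw [h]; decide
  simp only [pvOdds, List.map_cons, List.filter_cons, hc]
  simp

theorem pvOdds_cons_odd (k : String) (v : Int) (t : List (String × Int))
    (h : PySem.Int.mod v 2 = 1) : pvOdds ((k, v) :: t) = pvOdds t + 1 := by
  have hc : (PySem.Int.mod v 2 == 1) = true := by rw [h]; decide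
  simp only [pvOdds, List.map_cons, List.filter_cons, hc]
  simp

theorem pvALoop_cons_even (k : String) (v : Int) (t : List (String × Int))
    (s : Option Bool) (h : PySem.Int.mod v 2 = 0) :
    pvALoop ((k, v) :: t) s = pvALoop t s := by
  simp only [pvALoop]
  rw [if_pos h]

theorem pvALoop_cons_odd_none (k : String) (v : Int) (t : List (String × Int))
    (h : PySem.Int.mod v 2 = 1) :
    pvALoop ((k, v) :: t) none = pvALoop t (some true) := by
  simp only [pvALoop]
  rw [if_neg (by rw [h]; decide), if_pos h]

theorem pvALoop_cons_odd_some (k : String) (v : Int) (t : List (String × Int))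
    (b : Bool) (h : PySem.Int.mod v 2 = 1) :
    pvALoop ((k, v) :: t) (some b) = some false := by
  simp only [pvALoop]
  rw [if_neg (by rw [h]; decide), if_pos h]

theorem pvALoop_some_true (l : List (String × Int)) :
    pvALoop l (some true) = if pvOdds l = 0 then some true else some false := by
  induction l with
  | nil => simp [pvALoop, pvOdds]
  | cons p t ih =>
    obtain ⟨k, v⟩ := p
    rcases PySem.Int.mod_two_eq v with h | h
    · rw [pvALoop_cons_even k v t _ h, pvOdds_cons_even k v t h]; exact ih
    · rw [pvALoop_cons_odd_some k v t true h, pvOdds_cons_odd k v t h]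
      simp

theorem pvALoop_none (l : List (String × Int)) :
    pvALoop l none = if pvOdds l = 0 then none else some (pvOdds l == 1) := by
  induction l with
  | nil => simp [pvALoop, pvOdds]
  | cons p t ih =>
    obtain ⟨k, v⟩ := p
    rcases PySem.Int.mod_two_eq v with h | h
    · rw [pvALoop_cons_even k v t _ h, pvOdds_cons_even k v t h]; exact ih
    · rw [pvALoop_cons_odd_none k v t h, pvOdds_cons_odd k v t h,
        pvALoop_some_true t]
      by_cases h0 : pvOdds t = 0
      · simp [h0]
      · simp [h0]

-- ===== VERDICT (by name: the statement is the Claim_ definition above) =====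
theorem find_if_one_odd_spec : Claim_equal_find_if_one_odd := by
  intro l _
  show find_if_one_odd l = find_if_one_odd_alt l
  simp only [find_if_one_odd, find_if_one_odd_alt]
  rw [pvALoop_none l]
  rfl
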